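-- pv_equiv track=rewrite | github.com/mvsoliveira/SNpy | src/py/SortingUtils.py | get_muctpi_presort_in_sets
-- ===== SOURCE A (Python) =====
-- def get_muctpi_presort_in_sets(I):
--     rpc = [2]
--     tgc = [4]
--
--     if   I==352:
--         all = 32 * rpc + 72 * tgc
--     elif I==88:
--         all = 32 * rpc + 6 * tgc
--     elif I==64:
--         cand = [16]
--         all = 4 * cand
--     else:
--         all=[]
--
--     presort_in_sets = []
--     i = 0
--     for cand_sec in all:
--         presort_in_sets.append(set(range(i, i + cand_sec)))
--         i += cand_sec
--     return presort_in_sets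
-- ===== SOURCE B (Python) =====
-- def get_muctpi_presort_in_sets(I):
--     # Closed-form partition boundaries per config, then pairwise ranges.
--     if I == 352:
--         bounds = list(range(0, 64, 2)) + list(range(64, 353, 4))
--     elif I == 88:
--         bounds = list(range(0, 64, 2)) + list(range(64, 89, 4))
--     elif I == 64:
--         bounds = list(range(0, 65, 16))
--     else:
--         bounds = [0]
--     return [set(range(lo, hi)) for lo, hi in zip(bounds, bounds[1:])]
-- ===== Notes on version B (the rewrite author's own statement) =====
-- stated objective: simpler
-- what changed: B replaces A's chunk-size list plus running-offset loop with closed-form boundary lists (arithmetic ranges per config) and a single pairwise zip pass emitting set(range(lo, hi)) for consecutive boundaries.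
import Mathlib
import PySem

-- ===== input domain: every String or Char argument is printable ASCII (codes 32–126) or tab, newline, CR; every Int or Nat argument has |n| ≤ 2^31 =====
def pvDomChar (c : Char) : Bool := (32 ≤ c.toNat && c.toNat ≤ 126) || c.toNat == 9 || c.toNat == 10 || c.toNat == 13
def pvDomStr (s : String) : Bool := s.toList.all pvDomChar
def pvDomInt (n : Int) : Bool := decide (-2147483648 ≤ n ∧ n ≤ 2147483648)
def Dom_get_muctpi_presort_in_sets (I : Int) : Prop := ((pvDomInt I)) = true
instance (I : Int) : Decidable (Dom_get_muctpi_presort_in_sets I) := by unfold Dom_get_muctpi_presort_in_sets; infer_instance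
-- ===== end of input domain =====

set_option maxRecDepth 4000

-- B replaces the chunk-list + running-offset loop with closed-form boundary ranges and a pairwise pass (objective: simpler).


-- ===== PORT A =====
def get_muctpi_presort_in_sets (I : Int) : List (List Int) :=
  let rpc : List Int := [2]
  let tgc : List Int := [4]
  let all : List Int :=
    if I == 352 then (List.replicate 32 rpc).flatten ++ (List.replicate 72 tgc).flatten
    else if I == 88 then (List.replicate 32 rpc).flatten ++ (List.replicate 6 tgc).flatten
    else if I == 64 then
      let cand : List Int := [16]
      (List.replicate 4 cand).flatten
    else []
  let st := all.foldl
    (fun (st : List (List Int) × Int) cand_sec =>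
      (st.1 ++ [PySem.Set.ofList (PySem.List.pyRange st.2 (st.2 + cand_sec) 1)], st.2 + cand_sec))
    ([], 0)
  st.1

-- ===== PORT B =====
def get_muctpi_presort_in_sets_alt (I : Int) : List (List Int) :=
  let bounds : List Int :=
    if I == 352 then PySem.List.pyRange 0 64 2 ++ PySem.List.pyRange 64 353 4
    else if I == 88 then PySem.List.pyRange 0 64 2 ++ PySem.List.pyRange 64 89 4
    else if I == 64 then PySem.List.pyRange 0 65 16
    else [0]
  (bounds.zip bounds.tail).map (fun p => PySem.Set.ofList (PySem.List.pyRange p.1 p.2 1))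

-- ===== PRECONDITION & SPEC =====
def Spec_get_muctpi_presort_in_sets (I : Int) (out : List (List Int)) : Prop := out = get_muctpi_presort_in_sets_alt I
instance (I : Int) (out : List (List Int)) : Decidable (Spec_get_muctpi_presort_in_sets I out) := by unfold Spec_get_muctpi_presort_in_sets; infer_instance

-- ===== CLAIM (what is proved, stated in full; the proofs are below) =====
def Claim_equal_get_muctpi_presort_in_sets : Prop := ∀ (I : Int), Dom_get_muctpi_presort_in_sets I → Spec_get_muctpi_presort_in_sets I (get_muctpi_presort_in_sets I)

-- ===== LEMMAS AND PROOFS =====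

-- ===== VERDICT (by name: the statement is the Claim_ definition above) =====
theorem get_muctpi_presort_in_sets_spec : Claim_equal_get_muctpi_presort_in_sets := by
  intro I _
  unfold Spec_get_muctpi_presort_in_sets
  by_cases h352 : I = 352
  · subst h352; decide
  · by_cases h88 : I = 88
    · subst h88; decide
    · by_cases h64 : I = 64
      · subst h64; decide
      · simp [get_muctpi_presort_in_sets, get_muctpi_presort_in_sets_alt, h352, h88, h64]
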